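-- pv_equiv track=rewrite | github.com/ailyedu2030/xiami-quant | policy_monitor.py | _generate_recommendations
-- ===== SOURCE A (Python) =====
-- from typing import Dict, List
--
-- def _generate_recommendations(sector_ranking: List[Dict]) -> Dict:
--     """生成建议"""
--     positive_sectors = [s for s in sector_ranking if s["direction"] == "positive"]
--     negative_sectors = [s for s in sector_ranking if s["direction"] == "negative"]
--
--     return {
--         "重点关注": [s["sector"] for s in positive_sectors[:5]],
--         "回避": [s["sector"] for s in negative_sectors[:3]],
--         "中性观察": [s["sector"] for s in sector_ranking if s["direction"] == "neutral"][:3]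
--     }
-- ===== SOURCE B (Python) =====
-- from typing import Dict, List
--
-- def _generate_recommendations(sector_ranking: List[Dict]) -> Dict:
--     """生成建议: single capped-accumulation pass instead of three filtered passes + slicing."""
--     pos: List = []
--     neg: List = []
--     neu: List = []
--     for s in sector_ranking:
--         d = s["direction"]
--         if d == "positive":
--             if len(pos) < 5:
--                 pos.append(s["sector"])
--         elif d == "negative":
--             if len(neg) < 3:
--                 neg.append(s["sector"])
--         elif d == "neutral":
--             if len(neu) < 3:
--                 neu.append(s["sector"])
--     return {"重点关注": pos, "回避": neg, "中性观察": neu}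
-- ===== Notes on version B (the rewrite author's own statement) =====
-- stated objective: simpler
-- what changed: Replaces three filtered passes over sector_ranking plus slicing with a single loop that accumulates each sector into its bucket only while that bucket is below its cap (5/3/3).
import Mathlib
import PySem

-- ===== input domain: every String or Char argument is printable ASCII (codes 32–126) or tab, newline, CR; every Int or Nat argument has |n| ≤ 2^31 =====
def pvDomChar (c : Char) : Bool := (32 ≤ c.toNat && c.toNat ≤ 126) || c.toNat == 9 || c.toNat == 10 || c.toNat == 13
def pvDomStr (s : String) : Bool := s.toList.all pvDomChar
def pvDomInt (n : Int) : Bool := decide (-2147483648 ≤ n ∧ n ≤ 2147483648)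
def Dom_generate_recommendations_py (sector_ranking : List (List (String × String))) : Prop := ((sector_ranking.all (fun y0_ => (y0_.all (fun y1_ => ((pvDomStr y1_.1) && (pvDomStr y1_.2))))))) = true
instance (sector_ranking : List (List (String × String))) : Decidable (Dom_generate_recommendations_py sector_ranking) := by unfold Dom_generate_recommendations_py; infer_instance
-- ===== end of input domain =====

-- B replaces A's three filtered passes + slicing by one capped-accumulation pass (objective: simpler).


-- s[k] on a dict (assoc list); under Pre_ the key is present, so the "" default is never used
def pvGetKey (s : List (String × String)) (k : String) : String :=
  (PySem.Dict.mk s).getD k ""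

-- ===== PORT A =====
def generate_recommendations_py (sector_ranking : List (List (String × String))) : List (String × List String) :=
  let positive_sectors := sector_ranking.filter (fun s => pvGetKey s "direction" == "positive")
  let negative_sectors := sector_ranking.filter (fun s => pvGetKey s "direction" == "negative")
  [("重点关注", (positive_sectors.take 5).map (fun s => pvGetKey s "sector")),
   ("回避", (negative_sectors.take 3).map (fun s => pvGetKey s "sector")),
   ("中性观察", ((sector_ranking.filter (fun s => pvGetKey s "direction" == "neutral")).map (fun s => pvGetKey s "sector")).take 3)]

-- ===== PORT B =====
-- the loop body of Source B: one item updates the three capped buckets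
def pvStep (acc : List String × List String × List String) (s : List (String × String)) :
    List String × List String × List String :=
  let d := pvGetKey s "direction"
  if d == "positive" then
    if acc.1.length < 5 then (acc.1 ++ [pvGetKey s "sector"], acc.2.1, acc.2.2) else acc
  else if d == "negative" then
    if acc.2.1.length < 3 then (acc.1, acc.2.1 ++ [pvGetKey s "sector"], acc.2.2) else acc
  else if d == "neutral" then
    if acc.2.2.length < 3 then (acc.1, acc.2.1, acc.2.2 ++ [pvGetKey s "sector"]) else acc
  else acc

def generate_recommendations_py_alt (sector_ranking : List (List (String × String))) : List (String × List String) :=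
  let r := sector_ranking.foldl pvStep ([], [], [])
  [("重点关注", r.1), ("回避", r.2.1), ("中性观察", r.2.2)]

-- ===== PRECONDITION & SPEC =====
-- Pre_ is exactly the inputs on which A returns (no KeyError): every dict has "direction", and
-- "sector" is present on every neutral dict and on every positive/negative dict within its cap
-- (i.e. fewer than 5 positives / 3 negatives occur before it).
def Pre_generate_recommendations_py (sector_ranking : List (List (String × String))) : Prop :=
  ∀ p ∈ sector_ranking.zipIdx,
    (PySem.Dict.mk p.1).contains "direction" = true ∧
    (pvGetKey p.1 "direction" = "positive" →
      (sector_ranking.take p.2).countP (fun t => pvGetKey t "direction" == "positive") < 5 →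
      (PySem.Dict.mk p.1).contains "sector" = true) ∧
    (pvGetKey p.1 "direction" = "negative" →
      (sector_ranking.take p.2).countP (fun t => pvGetKey t "direction" == "negative") < 3 →
      (PySem.Dict.mk p.1).contains "sector" = true) ∧
    (pvGetKey p.1 "direction" = "neutral" → (PySem.Dict.mk p.1).contains "sector" = true)
instance (sector_ranking : List (List (String × String))) : Decidable (Pre_generate_recommendations_py sector_ranking) := by unfold Pre_generate_recommendations_py; infer_instance

def pvWitness_generate_recommendations_py : (List (List (String × String))) :=
  [[("direction", "positive"), ("sector", "tech")], [("direction", "neutral"), ("sector", "bank")]]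

def Spec_generate_recommendations_py (sector_ranking : List (List (String × String))) (out : List (String × List String)) : Prop := out = generate_recommendations_py_alt sector_ranking
instance (sector_ranking : List (List (String × String))) (out : List (String × List String)) : Decidable (Spec_generate_recommendations_py sector_ranking out) := by unfold Spec_generate_recommendations_py; infer_instance

-- ===== CLAIM (what is proved, stated in full; the proofs are below) =====
def Claim_equal_generate_recommendations_py : Prop := ∀ (sector_ranking : List (List (String × String))), Dom_generate_recommendations_py sector_ranking → Pre_generate_recommendations_py sector_ranking → Spec_generate_recommendations_py sector_ranking (generate_recommendations_py sector_ranking)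

-- ===== LEMMAS AND PROOFS =====

-- loop invariant: folding pvStep from (p, n, m) appends exactly the capped, mapped filters
theorem pvStep_foldl (xs : List (List (String × String))) :
    ∀ p n m : List String,
    xs.foldl pvStep (p, n, m) =
      (p ++ ((xs.filter (fun s => pvGetKey s "direction" == "positive")).take (5 - p.length)).map (fun s => pvGetKey s "sector"),
       n ++ ((xs.filter (fun s => pvGetKey s "direction" == "negative")).take (3 - n.length)).map (fun s => pvGetKey s "sector"),
       m ++ ((xs.filter (fun s => pvGetKey s "direction" == "neutral")).take (3 - m.length)).map (fun s => pvGetKey s "sector")) := by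
  induction xs with
  | nil => simp
  | cons s xs ih =>
    intro p n m
    by_cases hp : pvGetKey s "direction" = "positive"
    · by_cases hl : p.length < 5
      · simp only [List.foldl_cons, pvStep, hp]
        rw [ih]
        have h5 : 5 - p.length = (5 - (p.length + 1)) + 1 := by omega
        simp [hp, hl, h5, Nat.succ_sub_succ]
      · have h0 : 5 - p.length = 0 := by omega
        simp only [List.foldl_cons, pvStep, hp]
        rw [ih]
        simp [hp, h0, hl]
    · by_cases hn : pvGetKey s "direction" = "negative"
      · by_cases hl : n.length < 3
        · simp only [List.foldl_cons, pvStep, hn]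
          rw [ih]
          have h3 : 3 - n.length = (3 - (n.length + 1)) + 1 := by omega
          simp [hn, hl, h3, Nat.succ_sub_succ]
        · have h0 : 3 - n.length = 0 := by omega
          simp only [List.foldl_cons, pvStep, hn]
          rw [ih]
          simp [hn, h0, hl]
      · by_cases hm : pvGetKey s "direction" = "neutral"
        · by_cases hl : m.length < 3
          · simp only [List.foldl_cons, pvStep, hm]
            rw [ih]
            have h3 : 3 - m.length = (3 - (m.length + 1)) + 1 := by omega
            simp [hm, hl, h3, Nat.succ_sub_succ]
          · have h0 : 3 - m.length = 0 := by omega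
            simp only [List.foldl_cons, pvStep, hm]
            rw [ih]
            simp [hm, h0, hl]
        · simp only [List.foldl_cons, pvStep]
          rw [ih]
          simp [hp, hn, hm]

-- ===== VERDICT (by name: the statement is the Claim_ definition above) =====
theorem generate_recommendations_py_spec : Claim_equal_generate_recommendations_py := by
  intro sr _ _
  unfold Spec_generate_recommendations_py
  unfold generate_recommendations_py generate_recommendations_py_alt
  rw [pvStep_foldl]
  simp [List.map_take]
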